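-- pv_equiv track=rewrite | github.com/Azure/cyclecloud-slurm-workspace | bicep/files-to-load/create_ccw_template.py | replace_line
-- ===== SOURCE A (Python) =====
-- def replace_line(input_template, substring, replacement_string, replace_count = 1):
--     lines = input_template.split('\n')
--     for i, line in enumerate(lines):
--         if replace_count == 0:
--             break
--         if substring in line:
--             lines[i] = replacement_string
--             replace_count -= 1
--     return '\n'.join(lines)
-- ===== SOURCE B (Python) =====
-- def replace_line(input_template, substring, replacement_string, replace_count = 1):
--     lines = input_template.split('\n')
--     matches = [i for i, line in enumerate(lines) if substring in line]
--     targets = matches if replace_count < 0 else matches[:replace_count]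
--     for i in targets:
--         lines[i] = replacement_string
--     return '\n'.join(lines)
-- ===== Notes on version B (the rewrite author's own statement) =====
-- stated objective: alternative
-- what changed: Splits A's single interleaved count-and-replace loop (with break) into two passes: first collect the matching line indices, then rewrite only the selected indices (all matches when replace_count is negative, else the first replace_count of them).
import Mathlib
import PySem

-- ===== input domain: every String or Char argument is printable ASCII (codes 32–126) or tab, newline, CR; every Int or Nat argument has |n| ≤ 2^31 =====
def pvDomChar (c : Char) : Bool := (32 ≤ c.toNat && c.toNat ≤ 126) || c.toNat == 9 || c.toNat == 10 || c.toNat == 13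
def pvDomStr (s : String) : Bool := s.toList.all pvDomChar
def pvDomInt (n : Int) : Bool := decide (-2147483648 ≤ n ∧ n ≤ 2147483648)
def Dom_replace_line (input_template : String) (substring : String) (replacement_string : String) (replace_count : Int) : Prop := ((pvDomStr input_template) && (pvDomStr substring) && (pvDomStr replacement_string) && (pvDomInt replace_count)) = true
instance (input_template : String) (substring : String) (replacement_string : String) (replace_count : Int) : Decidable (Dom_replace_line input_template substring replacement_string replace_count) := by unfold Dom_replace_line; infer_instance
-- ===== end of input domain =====

-- B replaces A's single interleaved count-and-replace loop by an index-collection pass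
-- followed by a targeted rewrite of the selected indices (objective: alternative decomposition).

-- ===== PORT A =====
-- A's for-loop over enumerate(lines) with in-place mutation, a decrementing counter and
-- 'break' at count 0: structural recursion over the same list with the same counter.
def pvLoopA (substring replacement_string : String) : List String → Int → List String
  | [], _ => []
  | l :: rest, c =>
    if c = 0 then l :: rest
    else if PySem.Str.isIn substring l then
      replacement_string :: pvLoopA substring replacement_string rest (c - 1)
    else l :: pvLoopA substring replacement_string rest c

def replace_line (input_template : String) (substring : String) (replacement_string : String) (replace_count : Int) : String :=
  let lines := (PySem.Str.split? input_template "\n").getD []  -- sep "\n" ≠ "", never none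
  PySem.Str.join "\n" (pvLoopA substring replacement_string lines replace_count)

-- ===== PORT B =====
def replace_line_alt (input_template : String) (substring : String) (replacement_string : String) (replace_count : Int) : String :=
  let lines := (PySem.Str.split? input_template "\n").getD []  -- sep "\n" ≠ "", never none
  let hits := ((PySem.List.enumerate lines 0).filter (fun p => PySem.Str.isIn substring p.2)).map (·.1)
  let targets := if replace_count < 0 then hits else hits.take replace_count.toNat
  let lines' := targets.foldl (fun ls i => PySem.List.pySetD ls i replacement_string) lines
  PySem.Str.join "\n" lines'

-- ===== PRECONDITION & SPEC =====
def Spec_replace_line (input_template : String) (substring : String) (replacement_string : String) (replace_count : Int) (out : String) : Prop := out = replace_line_alt input_template substring replacement_string replace_count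
instance (input_template : String) (substring : String) (replacement_string : String) (replace_count : Int) (out : String) : Decidable (Spec_replace_line input_template substring replacement_string replace_count out) := by unfold Spec_replace_line; infer_instance

-- ===== CLAIM (what is proved, stated in full; the proofs are below) =====
def Claim_equal_replace_line : Prop := ∀ (input_template : String) (substring : String) (replacement_string : String) (replace_count : Int), Dom_replace_line input_template substring replacement_string replace_count → Spec_replace_line input_template substring replacement_string replace_count (replace_line input_template substring replacement_string replace_count)

-- ===== LEMMAS AND PROOFS =====

-- the matching indices of xs, enumerated from s (the 'hits' list of B's port)
def pvM (substring : String) (xs : List String) (s : Int) : List Int :=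
  ((PySem.List.enumerate xs s).filter (fun p => PySem.Str.isIn substring p.2)).map (·.1)

theorem pvM_cons_t {substring x : String} (xs : List String) (s : Int)
    (hm : PySem.Str.isIn substring x = true) :
    pvM substring (x :: xs) s = s :: pvM substring xs (s + 1) := by
  simp only [PySem.Str.isIn_eq] at hm
  simp [pvM, PySem.List.enumerate_cons, hm]

theorem pvM_cons_f {substring x : String} (xs : List String) (s : Int)
    (hm : PySem.Str.isIn substring x = false) :
    pvM substring (x :: xs) s = pvM substring xs (s + 1) := by
  simp only [PySem.Str.isIn_eq] at hm
  simp [pvM, PySem.List.enumerate_cons, hm]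

theorem pvM_shift (substring : String) (xs : List String) (s : Int) :
    pvM substring xs (s + 1) = (pvM substring xs s).map (· + 1) := by
  induction xs generalizing s with
  | nil => rfl
  | cons x xs ih =>
    cases hm : PySem.Str.isIn substring x
    · rw [pvM_cons_f xs (s + 1) hm, pvM_cons_f xs s hm, ih (s + 1)]
    · rw [pvM_cons_t xs (s + 1) hm, pvM_cons_t xs s hm, ih (s + 1)]; simp

theorem pvM_nonneg (substring : String) (xs : List String) (s : Int) (hs : 0 ≤ s) :
    ∀ i ∈ pvM substring xs s, 0 ≤ i := by
  induction xs generalizing s with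
  | nil => intro i hi; simp [pvM] at hi
  | cons x xs ih =>
    intro i hi
    cases hm : PySem.Str.isIn substring x
    · rw [pvM_cons_f xs s hm] at hi
      exact ih (s + 1) (by omega) i hi
    · rw [pvM_cons_t xs s hm] at hi
      rcases List.mem_cons.1 hi with h | h
      · omega
      · exact ih (s + 1) (by omega) i h

theorem pvLoopA_cons_zero (substring v x : String) (xs : List String) :
    pvLoopA substring v (x :: xs) 0 = x :: xs := by
  simp [pvLoopA]

theorem pvLoopA_cons_t (substring v x : String) (xs : List String) (c : Int)
    (hc : c ≠ 0) (hm : PySem.Str.isIn substring x = true) :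
    pvLoopA substring v (x :: xs) c = v :: pvLoopA substring v xs (c - 1) := by
  simp only [PySem.Str.isIn_eq] at hm
  simp [pvLoopA, hc, hm]

theorem pvLoopA_cons_f (substring v x : String) (xs : List String) (c : Int)
    (hc : c ≠ 0) (hm : PySem.Str.isIn substring x = false) :
    pvLoopA substring v (x :: xs) c = x :: pvLoopA substring v xs c := by
  simp only [PySem.Str.isIn_eq] at hm
  simp [pvLoopA, hc, hm]

theorem pvSet_succ (v x : String) (rest : List String) (i : Int) (hi : 0 ≤ i) :
    PySem.List.pySetD (x :: rest) (i + 1) v = x :: PySem.List.pySetD rest i v := by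
  rw [PySem.List.pySetD_of_nonneg _ _ (by omega : (0:Int) ≤ i + 1),
      PySem.List.pySetD_of_nonneg _ _ hi,
      show (i + 1).toNat = i.toNat + 1 by omega]
  rfl

theorem pvSet_zero (v x : String) (rest : List String) :
    PySem.List.pySetD (x :: rest) (0 : Int) v = v :: rest := by
  rw [PySem.List.pySetD_of_nonneg _ _ le_rfl]
  rfl

theorem pvFold_cons (v x : String) (rest : List String) (idxs : List Int)
    (h : ∀ i ∈ idxs, 0 ≤ i) :
    (idxs.map (· + 1)).foldl (fun ls i => PySem.List.pySetD ls i v) (x :: rest) =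
      x :: idxs.foldl (fun ls i => PySem.List.pySetD ls i v) rest := by
  induction idxs generalizing rest with
  | nil => rfl
  | cons i idxs ih =>
    simp only [List.map_cons, List.foldl_cons,
      pvSet_succ v x rest i (h i (List.mem_cons_self ..))]
    exact ih _ (fun j hj => h j (List.mem_cons_of_mem _ hj))

theorem pvMain (substring v : String) (lines : List String) (c : Int) :
    pvLoopA substring v lines c =
      (if c < 0 then pvM substring lines 0 else (pvM substring lines 0).take c.toNat).foldl
        (fun ls i => PySem.List.pySetD ls i v) lines := by
  induction lines generalizing c with
  | nil => simp [pvLoopA, pvM]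
  | cons l rest ih =>
    by_cases hc0 : c = 0
    · subst hc0
      simp [pvLoopA_cons_zero]
    · have hnn : ∀ i ∈ pvM substring rest 0, 0 ≤ i := pvM_nonneg substring rest 0 le_rfl
      have hnn' : ∀ n : Nat, ∀ i ∈ (pvM substring rest 0).take n, 0 ≤ i :=
        fun n i hi => hnn i (List.mem_of_mem_take hi)
      cases hm : PySem.Str.isIn substring l
      · rw [pvLoopA_cons_f substring v l rest c hc0 hm, pvM_cons_f rest 0 hm, pvM_shift]
        by_cases hneg : c < 0
        · rw [if_pos hneg, pvFold_cons v l rest _ hnn, ih c, if_pos hneg]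
        · rw [if_neg hneg, ← List.map_take, pvFold_cons v l rest _ (hnn' _), ih c, if_neg hneg]
      · rw [pvLoopA_cons_t substring v l rest c hc0 hm, pvM_cons_t rest 0 hm, pvM_shift]
        by_cases hneg : c < 0
        · rw [if_pos hneg, List.foldl_cons, pvSet_zero, pvFold_cons v v rest _ hnn,
            ih (c - 1), if_pos (by omega)]
        · have htake : ((0:Int) :: (pvM substring rest 0).map (· + 1)).take c.toNat =
              (0:Int) :: ((pvM substring rest 0).take (c - 1).toNat).map (· + 1) := by
            rw [show c.toNat = (c - 1).toNat + 1 by omega, List.take_succ_cons, List.map_take]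
          rw [if_neg hneg, htake, List.foldl_cons, pvSet_zero, pvFold_cons v v rest _ (hnn' _),
            ih (c - 1), if_neg (by omega)]

-- ===== VERDICT (by name: the statement is the Claim_ definition above) =====
theorem replace_line_spec : Claim_equal_replace_line := by
  intro it sub repl c _
  unfold Spec_replace_line replace_line replace_line_alt
  exact congrArg (PySem.Str.join "\n") (pvMain sub repl ((PySem.Str.split? it "\n").getD []) c)
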